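-- pv_equiv track=rewrite | github.com/vsantiago113/cisco_cli_simulator | main.py | parse_line_configs
-- ===== SOURCE A (Python) =====
-- def parse_line_configs(lines):
--     line_configs = []
--     current = None
--
--     for line in lines:
--         stripped = line.strip()
--
--         if line.startswith('line '):
--             if current:
--                 line_configs.append(current)
--
--             current = {
--                 'name': line.split(None, 1)[1],
--                 'access_class': '-',
--                 'exec_timeout': 'default',
--                 'logging': '-',
--                 'transport_input': '-',
--                 'transport_output': '-',
--             }
--             continue
--
--         if current is None:
--             continue
--
--         if not line.startswith(' '):
--             line_configs.append(current)
--             current = None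
--             continue
--
--         if stripped.startswith('access-class '):
--             current['access_class'] = stripped[len('access-class '):]
--         elif stripped.startswith('exec-timeout '):
--             current['exec_timeout'] = stripped[len('exec-timeout '):]
--         elif stripped == 'logging synchronous':
--             current['logging'] = 'synchronous'
--         elif stripped.startswith('transport input '):
--             current['transport_input'] = stripped[len('transport input '):]
--         elif stripped.startswith('transport output '):
--             current['transport_output'] = stripped[len('transport output '):]
--
--     if current:
--         line_configs.append(current)
--
--     return line_configs
-- ===== SOURCE B (Python) =====
-- def parse_line_configs(lines):
--     # Pass 1: segment the input into (name, body) blocks.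
--     blocks = []
--     i, n = 0, len(lines)
--     while i < n:
--         line = lines[i]
--         i += 1
--         if line.startswith('line '):
--             name = line.split(None, 1)[1]
--             body = []
--             while i < n and lines[i].startswith(' '):
--                 body.append(lines[i])
--                 i += 1
--             blocks.append((name, body))
--     # Pass 2: turn each block into a dict (last occurrence wins).
--     keymap = [('access-class ', 'access_class'),
--               ('exec-timeout ', 'exec_timeout'),
--               ('transport input ', 'transport_input'),
--               ('transport output ', 'transport_output')]
--     result = []
--     for name, body in blocks:
--         d = {'name': name, 'access_class': '-', 'exec_timeout': 'default',
--              'logging': '-', 'transport_input': '-', 'transport_output': '-'}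
--         for raw in body:
--             s = raw.strip()
--             if s == 'logging synchronous':
--                 d['logging'] = 'synchronous'
--             else:
--                 for prefix, key in keymap:
--                     if s.startswith(prefix):
--                         d[key] = s[len(prefix):]
--                         break
--         result.append(d)
--     return result
-- ===== Notes on version B (the rewrite author's own statement) =====
-- stated objective: alternative
-- what changed: B replaces A's single stateful scan (mutable current-dict with continue-driven branching) by a two-phase decomposition: pass 1 segments the lines into (name, body) blocks, pass 2 maps each block to a dict via a prefix->key table, so parsing structure and attribute extraction are separated.
import Mathlib
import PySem

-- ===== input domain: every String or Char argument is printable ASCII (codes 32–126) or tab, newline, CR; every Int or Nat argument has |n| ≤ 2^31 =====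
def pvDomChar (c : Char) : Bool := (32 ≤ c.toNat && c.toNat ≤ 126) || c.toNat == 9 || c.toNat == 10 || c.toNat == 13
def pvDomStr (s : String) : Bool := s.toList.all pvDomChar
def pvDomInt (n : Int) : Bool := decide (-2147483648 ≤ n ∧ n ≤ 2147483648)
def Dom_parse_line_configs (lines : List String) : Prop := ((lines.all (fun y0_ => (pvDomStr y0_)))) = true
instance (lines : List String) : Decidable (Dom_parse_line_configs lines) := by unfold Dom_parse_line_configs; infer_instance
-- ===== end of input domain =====

-- B separates A's single stateful scan into two passes (segment into blocks, then build each dict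
-- from a prefix→key table); same cost, different decomposition (objective: alternative).


-- ===== PORT A =====
-- line.split(None, 1)[1]; the IndexError case (nothing after 'line') is excluded by Pre_ below.
def pvNameOf (line : String) : String :=
  (PySem.List.pyGet? (PySem.Str.split₀Max line 1) 1).getD ""

-- the dict literal both Pythons build
def pvInitDict (name : String) : PySem.Dict String String :=
  PySem.Dict.ofList [("name", name), ("access_class", "-"), ("exec_timeout", "default"),
                     ("logging", "-"), ("transport_input", "-"), ("transport_output", "-")]

-- A's elif chain over the stripped line (strips inside, as the loop body does)
def pvUpdA (d : PySem.Dict String String) (line : String) : PySem.Dict String String :=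
  let stripped := PySem.Str.strip line
  if PySem.Str.startswith stripped "access-class " then
    d.insert "access_class" (PySem.Str.slice stripped (some 13) none)
  else if PySem.Str.startswith stripped "exec-timeout " then
    d.insert "exec_timeout" (PySem.Str.slice stripped (some 13) none)
  else if stripped = "logging synchronous" then
    d.insert "logging" "synchronous"
  else if PySem.Str.startswith stripped "transport input " then
    d.insert "transport_input" (PySem.Str.slice stripped (some 16) none)
  else if PySem.Str.startswith stripped "transport output " then
    d.insert "transport_output" (PySem.Str.slice stripped (some 17) none)
  else d

-- 'if current: line_configs.append(current)' (dict truthiness = non-empty)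
def pvFlushA (st : List (PySem.Dict String String) × Option (PySem.Dict String String)) :
    List (PySem.Dict String String) :=
  match st.2 with
  | some d => if d.items ≠ [] then st.1 ++ [d] else st.1
  | none => st.1

-- one iteration of A's for-loop
def pvStepA (st : List (PySem.Dict String String) × Option (PySem.Dict String String))
    (line : String) : List (PySem.Dict String String) × Option (PySem.Dict String String) :=
  if PySem.Str.startswith line "line " then
    (pvFlushA st, some (pvInitDict (pvNameOf line)))
  else
    match st.2 with
    | none => st
    | some d =>
      if ¬ PySem.Str.startswith line " " then (st.1 ++ [d], none)
      else (st.1, some (pvUpdA d line))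

def parse_line_configs (lines : List String) : List (List (String × String)) :=
  (pvFlushA (lines.foldl pvStepA ([], none))).map PySem.Dict.items

-- ===== PORT B =====
-- pass 1: segment into (name, body) blocks (recursion over the list = Source B's index loops)
mutual
def pvBlocks : List String → List (String × List String)
  | [] => []
  | l :: ls =>
    if PySem.Str.startswith l "line " then pvBlockBody (pvNameOf l) [] ls
    else pvBlocks ls
termination_by ls => (ls.length, 0)
def pvBlockBody (name : String) (body : List String) : List String → List (String × List String)
  | [] => [(name, body)]
  | l :: ls =>
    if PySem.Str.startswith l " " then pvBlockBody name (body ++ [l]) ls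
    else (name, body) :: pvBlocks (l :: ls)
termination_by ls => (ls.length, 1)
end

-- pass 2: the prefix → key table and the per-line update (for … break = find?)
def pvKeymap : List (String × String) :=
  [("access-class ", "access_class"), ("exec-timeout ", "exec_timeout"),
   ("transport input ", "transport_input"), ("transport output ", "transport_output")]

def pvUpdB (d : PySem.Dict String String) (raw : String) : PySem.Dict String String :=
  let s := PySem.Str.strip raw
  if s = "logging synchronous" then d.insert "logging" "synchronous"
  else
    match pvKeymap.find? (fun pk => PySem.Str.startswith s pk.1) with
    | some pk => d.insert pk.2 (PySem.Str.slice s (some (PySem.Str.len pk.1)) none)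
    | none => d

def pvMkDict (b : String × List String) : PySem.Dict String String :=
  b.2.foldl pvUpdB (pvInitDict b.1)

def parse_line_configs_alt (lines : List String) : List (List (String × String)) :=
  (pvBlocks lines).map (fun b => (pvMkDict b).items)

-- ===== PRECONDITION & SPEC =====
-- Pre_ excludes exactly the inputs on which A raises IndexError: a line that starts with
-- 'line ' but has only whitespace after it, so line.split(None, 1) has no element 1.
def Pre_parse_line_configs (lines : List String) : Prop :=
  ∀ l ∈ lines, PySem.Str.startswith l "line " = true → 2 ≤ (PySem.Str.split₀Max l 1).length
instance (lines : List String) : Decidable (Pre_parse_line_configs lines) := by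
  unfold Pre_parse_line_configs; infer_instance

def pvWitness_parse_line_configs : List String :=
  ["line vty 0 4", " access-class 10 in", " logging synchronous", "!", "line con 0", " exec-timeout 5 0"]

def Spec_parse_line_configs (lines : List String) (out : List (List (String × String))) : Prop := out = parse_line_configs_alt lines
instance (lines : List String) (out : List (List (String × String))) : Decidable (Spec_parse_line_configs lines out) := by unfold Spec_parse_line_configs; infer_instance

-- ===== CLAIM (what is proved, stated in full; the proofs are below) =====
def Claim_equal_parse_line_configs : Prop := ∀ (lines : List String), Dom_parse_line_configs lines → Pre_parse_line_configs lines → Spec_parse_line_configs lines (parse_line_configs lines)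

-- ===== LEMMAS AND PROOFS =====
set_option maxHeartbeats 1000000 in
theorem pvUpd_eq (d : PySem.Dict String String) (s : String) : pvUpdA d s = pvUpdB d s := by
  simp only [pvUpdA, pvUpdB, pvKeymap, List.find?]
  generalize PySem.Str.strip s = st
  by_cases hL : st = "logging synchronous"
  · subst hL
    simp only [show PySem.Str.startswith "logging synchronous" "access-class " = false from by decide,
      show PySem.Str.startswith "logging synchronous" "exec-timeout " = false from by decide,
      reduceIte]
    simp
  · by_cases h1 : PySem.Str.startswith st "access-class " = true
    · simp only [hL, h1, reduceIte,
        show PySem.Str.len "access-class " = 13 from by decide]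
    · rw [Bool.not_eq_true] at h1
      by_cases h2 : PySem.Str.startswith st "exec-timeout " = true
      · simp only [hL, h1, h2, reduceIte,
          show PySem.Str.len "exec-timeout " = 13 from by decide]
        simp
      · rw [Bool.not_eq_true] at h2
        by_cases h3 : PySem.Str.startswith st "transport input " = true
        · simp only [hL, h1, h2, h3, reduceIte,
            show PySem.Str.len "transport input " = 16 from by decide]
          simp
        · rw [Bool.not_eq_true] at h3
          by_cases h4 : PySem.Str.startswith st "transport output " = true
          · simp only [hL, h1, h2, h3, h4, reduceIte,
              show PySem.Str.len "transport output " = 17 from by decide]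
            simp
          · rw [Bool.not_eq_true] at h4
            simp only [hL, h1, h2, h3, h4, reduceIte]
            simp

theorem pvUpd_funext : pvUpdA = pvUpdB := funext fun d => funext fun s => pvUpd_eq d s

theorem items_insert_ne_nil (d : PySem.Dict String String) (k v : String)
    (h : d.items ≠ []) : (d.insert k v).items ≠ [] := by
  simp only [PySem.Dict.insert]
  split <;> simp [h]

theorem updA_items_ne_nil (d : PySem.Dict String String) (s : String)
    (h : d.items ≠ []) : (pvUpdA d s).items ≠ [] := by
  simp only [pvUpdA]
  split_ifs <;> first | exact items_insert_ne_nil _ _ _ h | exact h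

theorem foldl_insert_items_ne_nil (ps : List (String × String)) (d : PySem.Dict String String)
    (h : d.items ≠ []) : (ps.foldl (fun acc p => acc.insert p.1 p.2) d).items ≠ [] := by
  induction ps generalizing d with
  | nil => exact h
  | cons p ps ih => exact ih _ (items_insert_ne_nil _ _ _ h)

theorem init_items_ne_nil (n : String) : (pvInitDict n).items ≠ [] := by
  simp only [pvInitDict, PySem.Dict.ofList, PySem.Dict.update, List.foldl_cons]
  exact foldl_insert_items_ne_nil _ _ (by simp [PySem.Dict.insert, PySem.Dict.empty, PySem.Dict.contains])

theorem foldl_updA_items_ne_nil (body : List String) (d : PySem.Dict String String)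
    (h : d.items ≠ []) : (body.foldl pvUpdA d).items ≠ [] := by
  induction body generalizing d with
  | nil => exact h
  | cons l ls ih => exact ih _ (updA_items_ne_nil d l h)

theorem pvFlush_none (acc : List (PySem.Dict String String)) : pvFlushA (acc, none) = acc := rfl

theorem pvFlush_some (acc : List (PySem.Dict String String)) (d : PySem.Dict String String)
    (h : d.items ≠ []) : pvFlushA (acc, some d) = acc ++ [d] := by
  simp [pvFlushA, h]

theorem header_not_indent (l : String) (h : PySem.Str.startswith l "line " = true) :
    PySem.Str.startswith l " " = false := by
  rw [PySem.Str.startswith_eq, PySem.Chars.startswith_iff] at h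
  rw [PySem.Str.startswith_eq]
  by_contra hb
  rw [Bool.not_eq_false, PySem.Chars.startswith_iff] at hb
  rcases h with ⟨t1, ht1⟩
  rcases hb with ⟨t2, ht2⟩
  rw [show ("line ".toList) = ['l', 'i', 'n', 'e', ' '] from rfl] at ht1
  rw [show (" ".toList) = [' '] from rfl] at ht2
  rw [← ht1] at ht2
  simp at ht2

-- the main invariant: A's fold, flushed, equals acc ++ the dicts of B's blocks
theorem pvMain (n : Nat) : ∀ lines : List String, lines.length = n →
    (∀ acc, pvFlushA (lines.foldl pvStepA (acc, none)) = acc ++ (pvBlocks lines).map pvMkDict) ∧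
    (∀ acc name body,
      pvFlushA (lines.foldl pvStepA (acc, some (body.foldl pvUpdA (pvInitDict name)))) =
        acc ++ (pvBlockBody name body lines).map pvMkDict) := by
  induction n using Nat.strong_induction_on with
  | _ n ih =>
    intro lines hlen
    constructor
    · intro acc
      cases lines with
      | nil => simp [pvFlushA, pvBlocks]
      | cons l ls =>
        have hls : ls.length < n := by simp only [List.length_cons] at hlen; omega
        by_cases hH : PySem.Str.startswith l "line " = true
        · have hstep : pvStepA (acc, none) l = (acc, some (pvInitDict (pvNameOf l))) := by
            simp only [pvStepA]
            rw [if_pos hH, pvFlush_none]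
          have ih2 := ((ih ls.length hls ls rfl).2) acc (pvNameOf l) []
          rw [List.foldl_nil] at ih2
          rw [List.foldl_cons, hstep, ih2]
          simp only [pvBlocks, hH, reduceIte]
        · have hstep : pvStepA (acc, none) l = (acc, none) := by
            simp only [pvStepA]
            rw [if_neg hH]
          have ih1 := ((ih ls.length hls ls rfl).1) acc
          rw [List.foldl_cons, hstep, ih1]
          rw [Bool.not_eq_true] at hH
          simp at hH
          simp [pvBlocks, hH]
    · intro acc name body
      have hne := foldl_updA_items_ne_nil body (pvInitDict name) (init_items_ne_nil name)
      cases lines with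
      | nil =>
        rw [List.foldl_nil, pvFlush_some _ _ hne]
        simp only [pvBlockBody]
        simp [pvMkDict, pvUpd_funext]
      | cons l ls =>
        have hls : ls.length < n := by simp only [List.length_cons] at hlen; omega
        by_cases hH : PySem.Str.startswith l "line " = true
        · have hstep : pvStepA (acc, some (body.foldl pvUpdA (pvInitDict name))) l
              = (acc ++ [body.foldl pvUpdA (pvInitDict name)], some (pvInitDict (pvNameOf l))) := by
            simp only [pvStepA]
            rw [if_pos hH, pvFlush_some _ _ hne]
          have ih2 := ((ih ls.length hls ls rfl).2)
            (acc ++ [body.foldl pvUpdA (pvInitDict name)]) (pvNameOf l) []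
          rw [List.foldl_nil] at ih2
          rw [List.foldl_cons, hstep, ih2]
          simp only [pvBlockBody, header_not_indent l hH, reduceIte, pvBlocks, hH]
          simp [pvMkDict, pvUpd_funext]
        · by_cases hI : PySem.Str.startswith l " " = true
          · have hstep : pvStepA (acc, some (body.foldl pvUpdA (pvInitDict name))) l
                = (acc, some (pvUpdA (body.foldl pvUpdA (pvInitDict name)) l)) := by
              simp only [pvStepA]
              rw [if_neg hH, if_neg (not_not_intro hI)]
            have ih2 := ((ih ls.length hls ls rfl).2) acc name (body ++ [l])
            rw [List.foldl_append, List.foldl_cons, List.foldl_nil] at ih2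
            rw [List.foldl_cons, hstep, ih2]
            simp only [pvBlockBody, hI, reduceIte]
          · have hstep : pvStepA (acc, some (body.foldl pvUpdA (pvInitDict name))) l
                = (acc ++ [body.foldl pvUpdA (pvInitDict name)], none) := by
              simp only [pvStepA]
              rw [if_neg hH, if_pos hI]
            have ih1 := ((ih ls.length hls ls rfl).1) (acc ++ [body.foldl pvUpdA (pvInitDict name)])
            rw [List.foldl_cons, hstep, ih1]
            rw [Bool.not_eq_true] at hH hI
            simp at hH hI
            simp [pvBlockBody, hI, pvBlocks, hH, pvMkDict, pvUpd_funext]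

-- ===== VERDICT (by name: the statement is the Claim_ definition above) =====
theorem parse_line_configs_spec : Claim_equal_parse_line_configs := by
  intro lines _ _
  unfold Spec_parse_line_configs parse_line_configs parse_line_configs_alt
  rw [(pvMain lines.length lines rfl).1 []]
  simp [List.map_map, Function.comp]
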